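-- pv_equiv track=rewrite | github.com/fheitzer/GleasonXAI | src/gleasonxai/tree_loss.py | get_explanation_level_mapping
-- ===== SOURCE A (Python) =====
-- import copy
--
-- def get_explanation_level_mapping(higher_level, lower_level, label_hierarchy):
--
--     assert higher_level <= lower_level
--     assert len(label_hierarchy) >= lower_level - 1
--
--     if higher_level == lower_level:
--         return {i: [i] for i in range(len(label_hierarchy[higher_level]))}
--
--     label_mapping = copy.deepcopy(label_hierarchy[higher_level])
--
--     while higher_level != lower_level - 1:
--         higher_level += 1
--
--         one_level_remapping = copy.deepcopy(label_hierarchy[higher_level])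
--
--         for higher_class, mapped_labels in label_mapping.items():
--
--             new_targets = []
--
--             for mapped_label in mapped_labels:
--
--                 new_mapped_labels = one_level_remapping[mapped_label]
--                 new_targets.extend(new_mapped_labels)
--
--             label_mapping[higher_class] = new_targets
--
--     return label_mapping
-- ===== SOURCE B (Python) =====
-- def get_explanation_level_mapping(higher_level, lower_level, label_hierarchy):
--
--     assert higher_level <= lower_level
--     assert len(label_hierarchy) >= lower_level - 1
--
--     if higher_level == lower_level:
--         return {i: [i] for i in range(len(label_hierarchy[higher_level]))}
--
--     def expand(level, label):
--         if level == lower_level: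
--             return [label]
--         return [t for v in label_hierarchy[level][label] for t in expand(level + 1, v)]
--
--     return {c: [t for v in labels for t in expand(higher_level + 1, v)]
--             for c, labels in label_hierarchy[higher_level].items()}
-- ===== Notes on version B (the rewrite author's own statement) =====
-- stated objective: alternative
-- what changed: Replaces the iterative level-by-level in-place rewriting of the whole mapping dict (with a deepcopy per level) by a per-class recursive expansion down the hierarchy that builds the result in one dict comprehension.
-- outside the precondition, e.g. on get_explanation_level_mapping(0, 3, [{0: [0]}, {0: [0], 1: [9]}, {0: [0]}]): A returns {0: [0]}, B returns {0: [0]}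
import Mathlib
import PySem

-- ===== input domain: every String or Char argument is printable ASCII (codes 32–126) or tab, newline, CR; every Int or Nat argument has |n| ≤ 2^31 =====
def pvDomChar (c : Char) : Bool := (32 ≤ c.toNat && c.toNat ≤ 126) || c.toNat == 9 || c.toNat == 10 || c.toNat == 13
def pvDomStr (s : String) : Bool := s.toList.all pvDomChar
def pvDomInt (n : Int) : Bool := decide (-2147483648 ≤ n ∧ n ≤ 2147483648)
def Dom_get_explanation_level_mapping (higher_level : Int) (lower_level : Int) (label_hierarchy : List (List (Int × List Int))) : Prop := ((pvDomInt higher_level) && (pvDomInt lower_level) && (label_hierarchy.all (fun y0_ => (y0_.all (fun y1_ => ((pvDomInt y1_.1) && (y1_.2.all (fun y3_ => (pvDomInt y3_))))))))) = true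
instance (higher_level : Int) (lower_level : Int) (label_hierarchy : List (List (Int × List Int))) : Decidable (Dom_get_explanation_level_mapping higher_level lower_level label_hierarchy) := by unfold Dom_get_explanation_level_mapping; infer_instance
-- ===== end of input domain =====

-- B replaces A's level-by-level in-place rewriting of the whole mapping dict with a per-class
-- recursive expansion down the hierarchy ('alternative'; same asymptotic cost).

-- ===== PORT A =====
-- one pass of A's while-loop body: rewrite every entry of the mapping through level `lvl`
def pvStep (label_hierarchy : List (List (Int × List Int))) (lvl : Int)
    (mapping : PySem.Dict Int (List Int)) : PySem.Dict Int (List Int) :=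
  let one_level_remapping : PySem.Dict Int (List Int) :=
    PySem.Dict.mk (PySem.List.pyGetD label_hierarchy lvl [])
  mapping.items.foldl
    (fun m p =>
      m.insert p.1 (p.2.foldl (fun acc ml => acc ++ one_level_remapping.getD ml []) []))
    mapping

def get_explanation_level_mapping (higher_level : Int) (lower_level : Int) (label_hierarchy : List (List (Int × List Int))) : List (Int × List Int) :=
  if higher_level = lower_level then
    (PySem.List.pyRange 0 ((PySem.List.pyGetD label_hierarchy higher_level ([] : List (Int × List Int))).length : Int) 1).map (fun i => (i, [i]))
  else
    ((PySem.List.pyRange (higher_level + 1) lower_level 1).foldl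
      (fun mapping lvl => pvStep label_hierarchy lvl mapping)
      (PySem.Dict.mk (PySem.List.pyGetD label_hierarchy higher_level []))).items

-- ===== PORT B =====
-- expand(level, label): flatten `label` down to lower_level; fuel = lower_level - level (the
-- 0-fuel fallback [] is only a totality guard, never reached on the calls made below)
def pvExpand (label_hierarchy : List (List (Int × List Int))) (lower_level : Int) :
    Nat → Int → Int → List Int
  | 0, level, label => if level = lower_level then [label] else []
  | fuel + 1, level, label =>
    if level = lower_level then [label]
    else
      ((PySem.Dict.mk (PySem.List.pyGetD label_hierarchy level [])).getD label []).flatMap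
        (pvExpand label_hierarchy lower_level fuel (level + 1))

def get_explanation_level_mapping_alt (higher_level : Int) (lower_level : Int) (label_hierarchy : List (List (Int × List Int))) : List (Int × List Int) :=
  if higher_level = lower_level then
    (PySem.List.pyRange 0 ((PySem.List.pyGetD label_hierarchy higher_level ([] : List (Int × List Int))).length : Int) 1).map (fun i => (i, [i]))
  else
    (PySem.List.pyGetD label_hierarchy higher_level ([] : List (Int × List Int))).map
      (fun p => (p.1, p.2.flatMap
        (pvExpand label_hierarchy lower_level (lower_level - (higher_level + 1)).toNat (higher_level + 1))))

-- ===== PRECONDITION & SPEC =====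
-- Pre_ = A's two asserts, the indexed levels in range, and a closed-form key condition: every
-- label stored at a traversed level must be a key of the next level (A raises KeyError when a
-- REACHABLE label is missing; requiring it for all labels keeps Pre_ closed-form but slightly
-- narrower — on the excluded inputs whose missing key is unreachable A returns and B agrees
-- with it, see the cite).  Duplicate keys at the start level are also excluded: they cannot
-- arise from a Python dict under the type convention.
def Pre_get_explanation_level_mapping (higher_level : Int) (lower_level : Int) (label_hierarchy : List (List (Int × List Int))) : Prop :=
  higher_level ≤ lower_level ∧
  lower_level - 1 ≤ (label_hierarchy.length : Int) ∧
  PySem.Raise.InRange label_hierarchy.length higher_level ∧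
  (∀ lvl ∈ PySem.List.pyRange (higher_level + 1) lower_level 1,
      PySem.Raise.InRange label_hierarchy.length lvl) ∧
  ((PySem.List.pyGetD label_hierarchy higher_level ([] : List (Int × List Int))).map Prod.fst).Nodup ∧
  (∀ lvl ∈ PySem.List.pyRange (higher_level + 1) lower_level 1,
      ∀ p ∈ PySem.List.pyGetD label_hierarchy (lvl - 1) ([] : List (Int × List Int)),
        ∀ v ∈ p.2,
          v ∈ (PySem.List.pyGetD label_hierarchy lvl ([] : List (Int × List Int))).map Prod.fst)

instance (higher_level : Int) (lower_level : Int) (label_hierarchy : List (List (Int × List Int))) : Decidable (Pre_get_explanation_level_mapping higher_level lower_level label_hierarchy) := by unfold Pre_get_explanation_level_mapping; infer_instance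

def pvWitness_get_explanation_level_mapping : Int × Int × (List (List (Int × List Int))) :=
  (0, 2, [[(0, [0, 1]), (1, [1])], [(0, [2]), (1, [0])]])

def Spec_get_explanation_level_mapping (higher_level : Int) (lower_level : Int) (label_hierarchy : List (List (Int × List Int))) (out : List (Int × List Int)) : Prop := out = get_explanation_level_mapping_alt higher_level lower_level label_hierarchy
instance (higher_level : Int) (lower_level : Int) (label_hierarchy : List (List (Int × List Int))) (out : List (Int × List Int)) : Decidable (Spec_get_explanation_level_mapping higher_level lower_level label_hierarchy out) := by unfold Spec_get_explanation_level_mapping; infer_instance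

-- ===== CLAIM (what is proved, stated in full; the proofs are below) =====
def Claim_equal_get_explanation_level_mapping : Prop := ∀ (higher_level : Int) (lower_level : Int) (label_hierarchy : List (List (Int × List Int))), Dom_get_explanation_level_mapping higher_level lower_level label_hierarchy → Pre_get_explanation_level_mapping higher_level lower_level label_hierarchy → Spec_get_explanation_level_mapping higher_level lower_level label_hierarchy (get_explanation_level_mapping higher_level lower_level label_hierarchy)

-- ===== LEMMAS AND PROOFS =====

-- A's inner for-loop over a snapshot of items, inserting back at each key: with distinct keys it
-- rewrites the items list entrywise (done = the already-rewritten prefix).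
lemma pv_insert_fold (g : Int × List Int → List Int) :
    ∀ (post : List (Int × List Int)) (d : PySem.Dict Int (List Int))
      (done : List (Int × List Int)),
      d.items = done ++ post →
      (((done ++ post).map Prod.fst).Nodup) →
      (post.foldl (fun m p => m.insert p.1 (g p)) d).items
        = done ++ post.map (fun p => (p.1, g p)) := by
  intro post
  induction post with
  | nil => intro d done hitems _; simpa using hitems
  | cons p rest ih =>
    intro d done hitems hnd
    have hcont : d.contains p.1 = true := by
      apply (PySem.Dict.contains_iff_mem_keys d p.1).mpr
      simp [PySem.Dict.keys, hitems]
    have hdone : ∀ q ∈ done, q.1 ≠ p.1 := by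
      intro q hq heq
      have hnd2 : (done.map Prod.fst ++ p.1 :: rest.map Prod.fst).Nodup := by simpa using hnd
      exact (List.disjoint_of_nodup_append hnd2) (List.mem_map_of_mem hq) (by simp [heq])
    have hrest : ∀ q ∈ rest, q.1 ≠ p.1 := by
      intro q hq heq
      have hnd2 : (done.map Prod.fst ++ p.1 :: rest.map Prod.fst).Nodup := by simpa using hnd
      have := List.Nodup.of_append_right hnd2
      rw [List.nodup_cons] at this
      exact this.1 (by exact heq ▸ List.mem_map_of_mem hq)
    have hins : ((d.insert p.1 (g p)).items) = (done ++ [(p.1, g p)]) ++ rest := by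
      rw [PySem.Dict.items_insert_of_contains d (g p) hcont, hitems]
      simp only [List.map_append, List.map_cons]
      rw [List.map_congr_left (fun q hq => by simp [hdone q hq] : ∀ q ∈ done, (if q.1 == p.1 then (p.1, g p) else q) = id q),
          List.map_congr_left (fun q hq => by simp [hrest q hq] : ∀ q ∈ rest, (if q.1 == p.1 then (p.1, g p) else q) = id q)]
      simp
    have hnd' : (((done ++ [(p.1, g p)]) ++ rest).map Prod.fst).Nodup := by
      have : ((done ++ [(p.1, g p)]) ++ rest).map Prod.fst = (done ++ p :: rest).map Prod.fst := by simp
      rw [this]; exact hnd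
    have := ih (d.insert p.1 (g p)) (done ++ [(p.1, g p)]) hins hnd'
    simpa using this

-- one level of A's while loop, as a map over the entries
lemma pvStep_items (L : List (List (Int × List Int))) (lvl : Int)
    (M : PySem.Dict Int (List Int)) (hnd : M.keys.Nodup) :
    (pvStep L lvl M).items
      = M.items.map (fun p => (p.1, p.2.flatMap
          (fun ml => (PySem.Dict.mk (PySem.List.pyGetD L lvl [])).getD ml []))) := by
  unfold pvStep
  have := pv_insert_fold
    (fun p => p.2.foldl
      (fun acc ml => acc ++ (PySem.Dict.mk (PySem.List.pyGetD L lvl [])).getD ml []) [])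
    M.items M [] rfl (by simpa [PySem.Dict.keys] using hnd)
  simp only [List.nil_append] at this
  rw [this]
  apply List.map_congr_left
  intro p _
  rw [PySem.List.foldl_append_eq_flatMap]
  simp

-- A's while loop over the remaining levels equals B's recursive expansion, entrywise
lemma pv_levels_fold (L : List (List (Int × List Int))) (l : Int) :
    ∀ (n : Nat) (a : Int) (M : PySem.Dict Int (List Int)),
      a + (n : Int) = l → M.keys.Nodup →
      ((PySem.List.pyRange a l 1).foldl (fun mapping lvl => pvStep L lvl mapping) M).items
        = M.items.map (fun p => (p.1, p.2.flatMap (pvExpand L l n a))) := by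
  intro n
  induction n with
  | zero =>
    intro a M ha _
    have ha' : a = l := by omega
    rw [PySem.List.pyRange_one_eq_nil (le_of_eq ha'.symm)]
    simp [pvExpand, ha']
  | succ n ih =>
    intro a M ha hnd
    have halt : a < l := by omega
    rw [PySem.List.pyRange_one_cons halt]
    simp only [List.foldl_cons]
    have hstep := pvStep_items L a M hnd
    have hnd' : (pvStep L a M).keys.Nodup := by
      have hk : (pvStep L a M).keys = M.keys := by
        simp only [PySem.Dict.keys, hstep, List.map_map]
        rfl
      rw [hk]; exact hnd
    have := ih (a + 1) (pvStep L a M) (by omega) hnd'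
    rw [this, hstep, List.map_map]
    apply List.map_congr_left
    intro p _
    simp only [Function.comp]
    rw [List.flatMap_assoc]
    have hexp : (pvExpand L l (n + 1) a)
        = fun label => ((PySem.Dict.mk (PySem.List.pyGetD L a [])).getD label []).flatMap
            (pvExpand L l n (a + 1)) := by
      funext label
      rw [pvExpand, if_neg (by omega : ¬ a = l)]
    rw [hexp]

-- ===== VERDICT (by name: the statement is the Claim_ definition above) =====
theorem get_explanation_level_mapping_spec : Claim_equal_get_explanation_level_mapping := by
  intro h l L _ hpre
  unfold Spec_get_explanation_level_mapping
  unfold get_explanation_level_mapping get_explanation_level_mapping_alt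
  by_cases heq : h = l
  · simp [heq]
  · simp only [if_neg heq]
    obtain ⟨hle, -, -, -, hnd, -⟩ := hpre
    have hlt : h < l := lt_of_le_of_ne hle heq
    have := pv_levels_fold L l (l - (h + 1)).toNat (h + 1)
      (PySem.Dict.mk (PySem.List.pyGetD L h []))
      (by omega) (by simpa [PySem.Dict.keys] using hnd)
    rw [this]
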